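-- pv_equiv track=rewrite | github.com/GavinColeman12/email-scraper-tool | src/maps_search.py | _is_real_business_website
-- ===== SOURCE A (Python) =====
-- _SOCIAL_ONLY_HOSTS = (
--     "facebook.com", "fb.com", "instagram.com", "linkedin.com",
--     "twitter.com", "x.com", "tiktok.com", "youtube.com",
--     "yelp.com", "tripadvisor.com", "opentable.com", "doordash.com",
--     "ubereats.com", "grubhub.com", "seamless.com", "pinterest.com",
--     "wa.me", "wame.me",  # WhatsApp share links
-- )
--
-- def _is_real_business_website(url: str) -> bool:
--     """Return False for social/review-only URLs that can't be scraped."""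
--     if not url:
--         return False
--     u = url.lower().strip()
--     if not (u.startswith("http://") or u.startswith("https://")):
--         u = "https://" + u  # tolerate bare domains
--     for host in _SOCIAL_ONLY_HOSTS:
--         if f"://{host}/" in u or f"://www.{host}/" in u or u.endswith(f"://{host}") or u.endswith(f"://www.{host}"):
--             return False
--     return True
-- ===== SOURCE B (Python) =====
-- import re
--
-- _SOCIAL_ONLY_HOSTS = (
--     "facebook.com", "fb.com", "instagram.com", "linkedin.com",
--     "twitter.com", "x.com", "tiktok.com", "youtube.com",
--     "yelp.com", "tripadvisor.com", "opentable.com", "doordash.com",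
--     "ubereats.com", "grubhub.com", "seamless.com", "pinterest.com",
--     "wa.me", "wame.me",  # WhatsApp share links
-- )
--
-- _SOCIAL_RE = re.compile(
--     r"://(?:www\.)?(?:" + "|".join(re.escape(h) for h in _SOCIAL_ONLY_HOSTS) + r")(?:/|$)"
-- )
--
-- def _is_real_business_website(url: str) -> bool:
--     """Return False for social/review-only URLs that can't be scraped."""
--     if not url:
--         return False
--     u = url.lower().strip()
--     if not (u.startswith("http://") or u.startswith("https://")):
--         u = "https://" + u  # tolerate bare domains
--     return _SOCIAL_RE.search(u) is None
-- ===== Notes on version B (the rewrite author's own statement) =====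
-- stated objective: idiomatic
-- what changed: A loops over the 18 social hosts running four substring/endswith tests per host; B builds one module-level compiled regex from the same host tuple (scheme separator, optional www prefix, host alternation, then slash-or-end) and replaces the whole loop with a single re.search, returning True iff it finds no match.
import Mathlib
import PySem

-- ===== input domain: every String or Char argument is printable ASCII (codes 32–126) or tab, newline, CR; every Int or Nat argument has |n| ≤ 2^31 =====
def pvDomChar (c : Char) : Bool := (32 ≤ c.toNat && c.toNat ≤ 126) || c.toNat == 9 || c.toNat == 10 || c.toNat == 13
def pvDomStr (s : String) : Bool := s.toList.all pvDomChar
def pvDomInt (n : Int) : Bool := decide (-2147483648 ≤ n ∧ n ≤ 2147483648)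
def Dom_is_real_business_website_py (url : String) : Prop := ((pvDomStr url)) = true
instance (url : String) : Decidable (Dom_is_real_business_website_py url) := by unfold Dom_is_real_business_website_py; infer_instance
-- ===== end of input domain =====

-- B replaces A's 18-host loop of four substring/endswith tests by a single search for the compiled
-- regex "://(?:www\.)?(?:host1|…|host18)(?:/|$)" built once from the same host tuple (objective: idiomatic).

-- the module constant _SOCIAL_ONLY_HOSTS (shared by A and B)
def pvSocialHosts : List (List Char) :=
  ["facebook.com".toList, "fb.com".toList, "instagram.com".toList, "linkedin.com".toList,
   "twitter.com".toList, "x.com".toList, "tiktok.com".toList, "youtube.com".toList,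
   "yelp.com".toList, "tripadvisor.com".toList, "opentable.com".toList, "doordash.com".toList,
   "ubereats.com".toList, "grubhub.com".toList, "seamless.com".toList, "pinterest.com".toList,
   "wa.me".toList, "wame.me".toList]

-- ===== PORT A =====
-- the for-loop over _SOCIAL_ONLY_HOSTS: returns False as soon as a host matches, else True
def pvLoopA (u : List Char) : List (List Char) → Bool
  | [] => true
  | h :: hs =>
    if (PySem.Chars.isIn ("://".toList ++ h ++ ['/']) u
        || PySem.Chars.isIn ("://www.".toList ++ h ++ ['/']) u
        || PySem.Chars.endswith u ("://".toList ++ h)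
        || PySem.Chars.endswith u ("://www.".toList ++ h)) = true
    then false else pvLoopA u hs

def is_real_business_website_py (url : String) : Bool :=
  if url.toList = [] then false
  else
    let u := PySem.Chars.strip (PySem.Chars.lower url.toList)
    let u := if PySem.Chars.startswith u "http://".toList || PySem.Chars.startswith u "https://".toList
             then u else "https://".toList ++ u
    pvLoopA u pvSocialHosts

-- ===== PORT B =====
-- Source B's `_SOCIAL_RE.search(u)` is hand-ported (no regex engine in Lean/Mathlib) as an exact matcher
-- for this fixed pattern "://(?:www\.)?(?:host1|…|host18)(?:/|$)": the host alternation …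
def pvHostEnd (t : List Char) : Bool :=
  pvSocialHosts.any (fun h =>
    decide (t.take h.length = h) &&
    (decide (t.drop h.length = []) || decide ((t.drop h.length).take 1 = ['/'])))

-- … the whole pattern anchored at one position (greedy optional "www." with backtracking) …
def pvMatchAt (s : List Char) : Bool :=
  decide (s.take 3 = "://".toList) &&
  ((decide ((s.drop 3).take 4 = "www.".toList) && pvHostEnd ((s.drop 3).drop 4))
   || pvHostEnd (s.drop 3))

-- … and `search`: try the pattern at every start position, left to right
def pvSearch : List Char → Bool
  | [] => pvMatchAt []
  | c :: r => pvMatchAt (c :: r) || pvSearch r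

def is_real_business_website_py_alt (url : String) : Bool :=
  if url.toList = [] then false
  else
    let u := PySem.Chars.strip (PySem.Chars.lower url.toList)
    let u := if PySem.Chars.startswith u "http://".toList || PySem.Chars.startswith u "https://".toList
             then u else "https://".toList ++ u
    !(pvSearch u)

-- ===== PRECONDITION & SPEC =====
def Spec_is_real_business_website_py (url : String) (out : Bool) : Prop := out = is_real_business_website_py_alt url
instance (url : String) (out : Bool) : Decidable (Spec_is_real_business_website_py url out) := by unfold Spec_is_real_business_website_py; infer_instance

-- ===== CLAIM (what is proved, stated in full; the proofs are below) =====
def Claim_equal_is_real_business_website_py : Prop := ∀ (url : String), Dom_is_real_business_website_py url → Spec_is_real_business_website_py url (is_real_business_website_py url)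

-- ===== LEMMAS AND PROOFS =====

-- A's per-host test, as a Prop
def pvBad (h u : List Char) : Prop :=
  ("://".toList ++ h ++ ['/']) <:+: u ∨ ("://www.".toList ++ h ++ ['/']) <:+: u
  ∨ ("://".toList ++ h) <:+ u ∨ ("://www.".toList ++ h) <:+ u

lemma pvLoopA_false_iff (u : List Char) (hs : List (List Char)) :
    pvLoopA u hs = false ↔ ∃ h ∈ hs, pvBad h u := by
  induction hs with
  | nil => simp [pvLoopA]
  | cons h hs ih =>
    simp only [pvLoopA, pvBad]
    split_ifs with hc
    · simp only [Bool.or_eq_true, PySem.Chars.isIn_iff_infix, PySem.Chars.endswith_iff] at hc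
      constructor
      · intro _; exact ⟨h, by simp, by tauto⟩
      · intro _; rfl
    · simp only [Bool.or_eq_true, PySem.Chars.isIn_iff_infix, PySem.Chars.endswith_iff] at hc
      push Not at hc
      rw [ih]
      constructor
      · rintro ⟨g, hg, hbad⟩; exact ⟨g, by simp [hg], hbad⟩
      · rintro ⟨g, hg, hbad⟩
        rcases List.mem_cons.mp hg with rfl | hg'
        · exfalso; tauto
        · exact ⟨g, hg', hbad⟩

-- splitting a fixed-length prefix off take/drop conditions
lemma pvSplitAt (p s : List Char) (n : Nat) (hn : p.length = n) (Q : List Char → Prop) :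
    (s.take n = p ∧ Q (s.drop n)) ↔ ∃ r, s = p ++ r ∧ Q r := by
  subst hn
  constructor
  · rintro ⟨h1, h2⟩
    refine ⟨s.drop p.length, ?_, h2⟩
    conv_lhs => rw [← List.take_append_drop p.length s]
    rw [h1]
  · rintro ⟨r, rfl, h2⟩
    exact ⟨by simp, by simpa using h2⟩

lemma pvCat7 : "://www.".toList = "://".toList ++ "www.".toList := by decide

lemma pvHostEnd_iff (t : List Char) :
    pvHostEnd t = true ↔ ∃ h ∈ pvSocialHosts, ((h ++ ['/']) <+: t ∨ t = h) := by
  unfold pvHostEnd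
  rw [List.any_eq_true]
  constructor
  · rintro ⟨h, hm, hb⟩
    refine ⟨h, hm, ?_⟩
    simp only [Bool.and_eq_true, Bool.or_eq_true, decide_eq_true_eq] at hb
    obtain ⟨h1, h2⟩ := hb
    rcases h2 with h2 | h2
    · right; rw [← List.take_append_drop h.length t, h1, h2, List.append_nil]
    · left
      obtain ⟨r, hr, hQ⟩ := (pvSplitAt h t h.length rfl (fun r => r.take 1 = ['/'])).mp ⟨h1, h2⟩
      cases r with
      | nil => simp at hQ
      | cons a r' =>
        have ha : a = '/' := by simpa using hQ
        exact ⟨r', by rw [hr, ha]; simp⟩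
  · rintro ⟨h, hm, hb⟩
    refine ⟨h, hm, ?_⟩
    simp only [Bool.and_eq_true, Bool.or_eq_true, decide_eq_true_eq]
    rcases hb with ⟨r, hr⟩ | rfl
    · have : t = h ++ '/' :: r := by rw [← hr]; simp
      subst this
      exact ⟨by simp, Or.inr (by simp)⟩
    · exact ⟨by simp, Or.inl (by simp)⟩

lemma pvMatchAt_iff (s : List Char) :
    pvMatchAt s = true ↔ ∃ h ∈ pvSocialHosts,
      ((("://".toList ++ h ++ ['/']) <+: s ∨ s = "://".toList ++ h) ∨
       (("://www.".toList ++ h ++ ['/']) <+: s ∨ s = "://www.".toList ++ h)) := by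
  unfold pvMatchAt
  simp only [Bool.and_eq_true, Bool.or_eq_true, decide_eq_true_eq, pvHostEnd_iff]
  constructor
  · rintro ⟨h3, hrest⟩
    obtain ⟨r3, hr3, hQ⟩ := (pvSplitAt "://".toList s 3 (by decide)
      (fun t => (t.take 4 = "www.".toList ∧ ∃ h ∈ pvSocialHosts, ((h ++ ['/']) <+: t.drop 4 ∨ t.drop 4 = h))
        ∨ ∃ h ∈ pvSocialHosts, ((h ++ ['/']) <+: t ∨ t = h))).mp ⟨h3, hrest⟩
    rcases hQ with ⟨h4, hend⟩ | hend
    · obtain ⟨r4, hr4, ⟨h, hm, hh⟩⟩ := (pvSplitAt "www.".toList r3 4 (by decide)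
        (fun t => ∃ h ∈ pvSocialHosts, ((h ++ ['/']) <+: t ∨ t = h))).mp ⟨h4, hend⟩
      refine ⟨h, hm, Or.inr ?_⟩
      subst hr3; subst hr4
      rcases hh with ⟨r, hr⟩ | rfl
      · exact Or.inl ⟨r, by rw [← hr]; simp [pvCat7]⟩
      · exact Or.inr (by simp [pvCat7])
    · obtain ⟨h, hm, hh⟩ := hend
      refine ⟨h, hm, Or.inl ?_⟩
      subst hr3
      rcases hh with ⟨r, hr⟩ | rfl
      · exact Or.inl ⟨r, by rw [← hr]; simp⟩
      · exact Or.inr rfl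
  · rintro ⟨h, hm, hcase⟩
    rcases hcase with hc | hc
    · -- no-www branch: the right disjunct of the backtracking disjunction
      have hgoal : ∃ r3, s = "://".toList ++ r3 ∧ ∃ g ∈ pvSocialHosts, ((g ++ ['/']) <+: r3 ∨ r3 = g) := by
        rcases hc with ⟨r, hr⟩ | rfl
        · exact ⟨h ++ '/' :: r, by rw [← hr]; simp, h, hm, Or.inl ⟨r, by simp⟩⟩
        · exact ⟨h, by simp, h, hm, Or.inr rfl⟩
      obtain ⟨hs1, hs2⟩ := (pvSplitAt "://".toList s 3 (by decide)
        (fun t => ∃ g ∈ pvSocialHosts, ((g ++ ['/']) <+: t ∨ t = g))).mpr hgoal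
      exact ⟨hs1, Or.inr hs2⟩
    · -- www branch
      have hgoal : ∃ r3, s = "://".toList ++ r3 ∧
          (r3.take 4 = "www.".toList ∧ ∃ g ∈ pvSocialHosts, ((g ++ ['/']) <+: r3.drop 4 ∨ r3.drop 4 = g)) := by
        rcases hc with ⟨r, hr⟩ | rfl
        · refine ⟨"www.".toList ++ h ++ '/' :: r, by rw [← hr]; simp [pvCat7], ?_⟩
          exact (pvSplitAt "www.".toList _ 4 (by decide)
            (fun t => ∃ g ∈ pvSocialHosts, ((g ++ ['/']) <+: t ∨ t = g))).mpr
            ⟨h ++ '/' :: r, by simp, h, hm, Or.inl ⟨r, by simp⟩⟩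
        · refine ⟨"www.".toList ++ h, by simp [pvCat7], ?_⟩
          exact (pvSplitAt "www.".toList _ 4 (by decide)
            (fun t => ∃ g ∈ pvSocialHosts, ((g ++ ['/']) <+: t ∨ t = g))).mpr ⟨h, rfl, h, hm, Or.inr rfl⟩
      obtain ⟨hs1, hs2⟩ := (pvSplitAt "://".toList s 3 (by decide)
        (fun t => t.take 4 = "www.".toList ∧ ∃ g ∈ pvSocialHosts, ((g ++ ['/']) <+: t.drop 4 ∨ t.drop 4 = g))).mpr hgoal
      exact ⟨hs1, Or.inl hs2⟩

lemma pvSearch_iff (u : List Char) :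
    pvSearch u = true ↔ ∃ s, s <:+ u ∧ pvMatchAt s = true := by
  induction u with
  | nil =>
    simp only [pvSearch]
    constructor
    · intro h; exact ⟨[], List.nil_suffix, h⟩
    · rintro ⟨s, hs, hm⟩; rwa [List.suffix_nil.mp hs] at hm
  | cons c r ih =>
    simp only [pvSearch, Bool.or_eq_true, ih]
    constructor
    · rintro (h | ⟨s, hs, hm⟩)
      · exact ⟨c :: r, List.suffix_refl _, h⟩
      · exact ⟨s, hs.trans (List.suffix_cons c r), hm⟩
    · rintro ⟨s, hs, hm⟩
      rcases hs with ⟨pre, hpre⟩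
      cases pre with
      | nil =>
        left
        have hcr : s = c :: r := by simpa using hpre
        exact hcr ▸ hm
      | cons a pre' =>
        right
        have hp : a = c ∧ pre' ++ s = r := by simpa using hpre
        exact ⟨s, ⟨pre', hp.2⟩, hm⟩

lemma pvPrefixSuffix (p u : List Char) : (∃ s, s <:+ u ∧ p <+: s) ↔ p <:+: u := by
  rw [List.infix_iff_prefix_suffix]
  constructor
  · rintro ⟨s, h1, h2⟩; exact ⟨s, h2, h1⟩
  · rintro ⟨s, h1, h2⟩; exact ⟨s, h2, h1⟩

lemma pvSearch_iff_bad (u : List Char) :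
    pvSearch u = true ↔ ∃ h ∈ pvSocialHosts, pvBad h u := by
  rw [pvSearch_iff]
  constructor
  · rintro ⟨s, hsuf, hm⟩
    obtain ⟨h, hmem, hc⟩ := (pvMatchAt_iff s).mp hm
    refine ⟨h, hmem, ?_⟩
    unfold pvBad
    rcases hc with (hc | hc) | (hc | hc)
    · exact Or.inl ((pvPrefixSuffix _ u).mp ⟨s, hsuf, hc⟩)
    · exact Or.inr (Or.inr (Or.inl (hc ▸ hsuf)))
    · exact Or.inr (Or.inl ((pvPrefixSuffix _ u).mp ⟨s, hsuf, hc⟩))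
    · exact Or.inr (Or.inr (Or.inr (hc ▸ hsuf)))
  · rintro ⟨h, hmem, hbad⟩
    unfold pvBad at hbad
    rcases hbad with hb | hb | hb | hb
    · obtain ⟨s, h1, h2⟩ := (pvPrefixSuffix _ u).mpr hb
      exact ⟨s, h1, (pvMatchAt_iff s).mpr ⟨h, hmem, Or.inl (Or.inl h2)⟩⟩
    · obtain ⟨s, h1, h2⟩ := (pvPrefixSuffix _ u).mpr hb
      exact ⟨s, h1, (pvMatchAt_iff s).mpr ⟨h, hmem, Or.inr (Or.inl h2)⟩⟩
    · exact ⟨_, hb, (pvMatchAt_iff _).mpr ⟨h, hmem, Or.inl (Or.inr rfl)⟩⟩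
    · exact ⟨_, hb, (pvMatchAt_iff _).mpr ⟨h, hmem, Or.inr (Or.inr rfl)⟩⟩

lemma pvMain (u : List Char) : pvLoopA u pvSocialHosts = !(pvSearch u) := by
  have h : pvLoopA u pvSocialHosts = false ↔ pvSearch u = true := by
    rw [pvLoopA_false_iff, ← pvSearch_iff_bad]
  cases hA : pvLoopA u pvSocialHosts <;> cases hB : pvSearch u <;> simp_all

-- ===== VERDICT (by name: the statement is the Claim_ definition above) =====
theorem is_real_business_website_py_spec : Claim_equal_is_real_business_website_py := by
  intro url _
  unfold Spec_is_real_business_website_py is_real_business_website_py is_real_business_website_py_alt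
  split_ifs with h
  · rfl
  · exact pvMain _
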